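-- pv_equiv track=rewrite | github.com/typ49/Semestre_6 | sécurité/TP/TP_Heam/decrypter.py | identifier_mots_une_lettre
-- ===== SOURCE A (Python) =====
-- def identifier_mots_une_lettre(texte):
--     """Identifie et suggère des corrections pour les mots d'une lettre mal chiffrés."""
--     mots_une_lettre = ['A', 'Y']  # Les seuls mots d'une lettre en français
--     suggestions = {}
--     mots = texte.split()
--     for mot in mots:
--         if len(mot) == 1 and mot not in mots_une_lettre:
--             for suggestion in mots_une_lettre:
--                 if mot not in suggestions:
--                     suggestions[mot] = [suggestion]
--                 else:
--                     suggestions[mot].append(suggestion)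
--     return suggestions
-- ===== SOURCE B (Python) =====
-- def identifier_mots_une_lettre(texte):
--     """Identifie et suggère des corrections pour les mots d'une lettre mal chiffrés.
--
--     Count-then-build: first tally each offending one-letter token, then build
--     the suggestion list as ['A', 'Y'] repeated once per occurrence."""
--     mots_une_lettre = ['A', 'Y']
--     comptes = {}
--     for mot in texte.split():
--         if len(mot) == 1 and mot not in mots_une_lettre:
--             comptes[mot] = comptes.get(mot, 0) + 1
--     return {mot: mots_une_lettre * n for mot, n in comptes.items()}
-- ===== Notes on version B (the rewrite author's own statement) =====
-- stated objective: alternative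
-- what changed: Replaces A's per-occurrence insert-or-append dict building (with an inner loop over the suggestion list) by a count-then-build decomposition: first tally each offending one-letter token, then build each suggestion list as ['A','Y'] * count in one comprehension.
import Mathlib
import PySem

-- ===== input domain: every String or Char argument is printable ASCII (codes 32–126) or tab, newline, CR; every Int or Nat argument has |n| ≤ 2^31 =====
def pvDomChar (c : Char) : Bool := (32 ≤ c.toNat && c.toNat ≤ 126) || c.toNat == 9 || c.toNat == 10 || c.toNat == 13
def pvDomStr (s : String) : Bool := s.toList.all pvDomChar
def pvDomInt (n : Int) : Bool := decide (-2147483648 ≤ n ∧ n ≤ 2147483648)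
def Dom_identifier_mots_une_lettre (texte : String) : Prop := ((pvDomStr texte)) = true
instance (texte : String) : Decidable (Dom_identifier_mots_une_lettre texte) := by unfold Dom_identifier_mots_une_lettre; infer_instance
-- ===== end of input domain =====

-- B replaces A's per-occurrence incremental dict building by a count-then-build
-- decomposition (tally offending tokens, then emit ['A','Y'] * count); objective: alternative.

-- ===== PORT A =====
-- literal transliteration: per word, per suggestion, insert-or-append into the dict
def identifier_mots_une_lettre (texte : String) : List (String × List String) :=
  let motsUneLettre : List String := ["A", "Y"]
  let suggestions : PySem.Dict String (List String) := PySem.Dict.empty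
  let mots := PySem.Str.split₀ texte
  let final := mots.foldl (fun d mot =>
    if PySem.Str.len mot = 1 ∧ mot ∉ motsUneLettre then
      motsUneLettre.foldl (fun d suggestion =>
        if ¬ d.contains mot then d.insert mot [suggestion]
        else d.modify mot [] (· ++ [suggestion])) d
    else d) suggestions
  final.items

-- ===== PORT B =====
-- literal transliteration of Source B: tally loop, then a comprehension over the tally's items
def identifier_mots_une_lettre_alt (texte : String) : List (String × List String) :=
  let motsUneLettre : List String := ["A", "Y"]
  let comptes := (PySem.Str.split₀ texte).foldl (fun d mot =>
    if PySem.Str.len mot = 1 ∧ mot ∉ motsUneLettre then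
      d.insert mot (d.getD mot 0 + 1)
    else d) (PySem.Dict.empty : PySem.Dict String Int)
  comptes.items.map (fun p => (p.1, (List.replicate p.2.toNat motsUneLettre).flatten))

-- ===== PRECONDITION & SPEC =====
def Spec_identifier_mots_une_lettre (texte : String) (out : List (String × List String)) : Prop := out = identifier_mots_une_lettre_alt texte
instance (texte : String) (out : List (String × List String)) : Decidable (Spec_identifier_mots_une_lettre texte out) := by unfold Spec_identifier_mots_une_lettre; infer_instance

-- ===== CLAIM (what is proved, stated in full; the proofs are below) =====
def Claim_equal_identifier_mots_une_lettre : Prop := ∀ (texte : String), Dom_identifier_mots_une_lettre texte → Spec_identifier_mots_une_lettre texte (identifier_mots_une_lettre texte)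

-- ===== LEMMAS AND PROOFS =====

-- a fold guarded by an if is the fold over the filtered list
theorem foldl_if_filter {α β : Type} (p : α → Prop) [DecidablePred p]
    (g : β → α → β) (l : List α) (init : β) :
    l.foldl (fun d x => if p x then g d x else d) init
      = (l.filter (fun x => decide (p x))).foldl g init := by
  induction l generalizing init with
  | nil => rfl
  | cons a l ih =>
    simp only [List.foldl_cons, List.filter_cons]
    by_cases h : p a <;> simp [h, ih]

-- A's inner loop over ["A","Y"] is one modify appending ["A","Y"]
theorem inner_eq (d : PySem.Dict String (List String)) (mot : String) :
    (["A", "Y"] : List String).foldl (fun d suggestion =>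
        if ¬ d.contains mot then d.insert mot [suggestion]
        else d.modify mot [] (· ++ [suggestion])) d
      = d.modify mot [] (· ++ ["A", "Y"]) := by
  have step : ∀ (d : PySem.Dict String (List String)) (s : String),
      (if ¬ d.contains mot then d.insert mot [s]
       else d.modify mot [] (· ++ [s])) = d.modify mot [] (· ++ [s]) := by
    intro d s
    by_cases h : d.contains mot = true
    · simp [h]
    · simp only [Bool.not_eq_true] at h
      simp [PySem.Dict.modify, PySem.Dict.getD_of_not_contains d _ h, h]
  simp only [List.foldl_cons, List.foldl_nil, step]
  simp [PySem.Dict.modify, PySem.Dict.insert_insert_self, PySem.Dict.getD_insert_self]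

-- value accumulated by the modify-append loop: ["A","Y"] once per occurrence
theorem getD_foldl_modify_appendAY (ws : List String) (d : PySem.Dict String (List String)) (k : String) :
    ((ws.foldl (fun d w => d.modify w [] (· ++ ["A", "Y"])) d).getD k [])
      = d.getD k [] ++ (List.replicate (ws.count k) (["A", "Y"] : List String)).flatten := by
  induction ws generalizing d with
  | nil => simp
  | cons w ws ih =>
    simp only [List.foldl_cons, ih, PySem.Dict.getD_modify]
    by_cases h : k = w
    · subst h
      simp [List.count_cons_self, List.replicate_succ]
    · have h' : ¬ w = k := fun e => h e.symm
      simp [h', h]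

-- ===== VERDICT (by name: the statement is the Claim_ definition above) =====
theorem identifier_mots_une_lettre_spec : Claim_equal_identifier_mots_une_lettre := by
  intro texte _
  show identifier_mots_une_lettre texte = identifier_mots_une_lettre_alt texte
  unfold identifier_mots_une_lettre identifier_mots_une_lettre_alt
  simp only
  set p : String → Prop := fun mot => PySem.Str.len mot = 1 ∧ mot ∉ (["A", "Y"] : List String) with hp
  set ws : List String := (PySem.Str.split₀ texte).filter (fun x => decide (p x)) with hws
  -- A side: one modify per filtered word
  have hA : (PySem.Str.split₀ texte).foldl (fun d mot =>
      if p mot then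
        (["A", "Y"] : List String).foldl (fun d suggestion =>
          if ¬ d.contains mot then d.insert mot [suggestion]
          else d.modify mot [] (· ++ [suggestion])) d
      else d) (PySem.Dict.empty : PySem.Dict String (List String))
      = ws.foldl (fun d w => d.modify w [] (· ++ ["A", "Y"])) PySem.Dict.empty := by
    rw [foldl_if_filter, ← hws]
    exact List.foldl_ext _ _ _ (fun d w _ => inner_eq d w)
  -- B side: the tally loop is Counter(ws)
  have hB : (PySem.Str.split₀ texte).foldl (fun d mot =>
      if p mot then d.insert mot (d.getD mot 0 + 1) else d)
      (PySem.Dict.empty : PySem.Dict String Int) = PySem.Dict.counter ws := by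
    rw [foldl_if_filter, ← hws, PySem.Dict.foldl_insert_getD_add_one_eq_counter]
  rw [hA, hB, PySem.Dict.items_counter]
  -- A's items as a map over its (nodup) keys
  have hkeys : (ws.foldl (fun d w => d.modify w [] (· ++ ["A", "Y"]))
      (PySem.Dict.empty : PySem.Dict String (List String))).keys = PySem.Set.ofList ws := by
    rw [PySem.Dict.keys_foldl_modify]
    simp [PySem.Set.update_nil_left]
  rw [PySem.Dict.items_eq_map_keys _ (by rw [hkeys]; exact PySem.Set.nodup_ofList ws) [],
      hkeys, List.map_map]
  apply List.map_congr_left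
  intro k _
  simp [Function.comp, getD_foldl_modify_appendAY]
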